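-- pv_equiv track=rewrite | github.com/Luke-Flandre/CSC3100 | CSC3100/A4_123090132/A4_P1_123090132.py | generate_orders
-- ===== SOURCE A (Python) =====
-- from itertools import permutations, product
--
-- def generate_orders(numbers):
--     # Validate the input length
--
--     first, last = numbers[0], numbers[-1]
--     middle = numbers[1:-1]
--
--     # Form pairs from the middle numbers
--     pairs = [(middle[i], middle[i + 1]) for i in range(0, len(middle), 2)]
--
--     # Generate all pair permutations
--     pair_permutations = permutations(pairs)
--
--     # Generate all combinations of internal pair swaps
--     all_orders = []
--     for perm in pair_permutations:
--         # Generate all internal swaps for the current permutation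
--         internal_swaps = product(*[(p, (p[1], p[0])) for p in perm])
--         for swapped in internal_swaps:
--             # Flatten the pairs and add the first and last elements
--             order = [first] + [num for pair in swapped for num in pair] + [last]
--             all_orders.append(order)
--
--     return all_orders
-- ===== SOURCE B (Python) =====
-- def _perms(pairs):
--     # all orderings of pairs, choosing the next pair by ascending index
--     # (lexicographic index-removal order)
--     if not pairs:
--         return [[]]
--     return [[pairs[i]] + rest
--             for i in range(len(pairs))
--             for rest in _perms(pairs[:i] + pairs[i + 1:])]
--
--
-- def _orients(perm):
--     # all flattened orientation choices, leftmost pair varying slowest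
--     if not perm:
--         return [[]]
--     a, b = perm[0]
--     tails = _orients(perm[1:])
--     return [[a, b] + t for t in tails] + [[b, a] + t for t in tails]
--
--
-- def generate_orders(numbers):
--     first, last = numbers[0], numbers[-1]
--     middle = numbers[1:-1]
--     pairs = [(middle[i], middle[i + 1]) for i in range(0, len(middle), 2)]
--     return [[first] + flat + [last]
--             for perm in _perms(pairs)
--             for flat in _orients(perm)]
-- ===== Notes on version B (the rewrite author's own statement) =====
-- stated objective: alternative
-- what changed: Replaces itertools.permutations/product plus nested append loops by two plain recursive helpers (index-removal permutation recursion and a head/tail orientation recursion) composed in a single comprehension.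
import Mathlib
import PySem

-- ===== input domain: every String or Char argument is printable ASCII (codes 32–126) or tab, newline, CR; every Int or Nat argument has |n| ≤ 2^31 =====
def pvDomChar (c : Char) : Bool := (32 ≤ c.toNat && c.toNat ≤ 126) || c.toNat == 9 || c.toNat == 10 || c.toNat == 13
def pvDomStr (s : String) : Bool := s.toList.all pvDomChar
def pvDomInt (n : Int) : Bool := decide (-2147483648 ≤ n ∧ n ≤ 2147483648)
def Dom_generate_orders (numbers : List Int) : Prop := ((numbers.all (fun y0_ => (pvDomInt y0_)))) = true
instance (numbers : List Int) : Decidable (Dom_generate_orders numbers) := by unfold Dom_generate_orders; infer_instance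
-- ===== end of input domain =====

-- B replaces itertools.permutations/product and the append loops of A by two plain
-- recursive helpers composed in one comprehension (alternative decomposition, same cost).


-- ===== PORT A =====
-- itertools.permutations, ported as: pick each element (in index order) to go first,
-- recurse on the remainder; fuel = list length (each step removes exactly one element)
def pvSelect : List (Int × Int) → List ((Int × Int) × List (Int × Int))
  | [] => []
  | x :: xs => (x, xs) :: (pvSelect xs).map (fun r => (r.1, x :: r.2))

def pvPermsA (fuel : Nat) (l : List (Int × Int)) : List (List (Int × Int)) :=
  match fuel with
  | 0 => [[]]
  | n + 1 =>
    match l with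
    | [] => [[]]
    | _ :: _ => (pvSelect l).flatMap (fun r => (pvPermsA n r.2).map (fun t => r.1 :: t))

-- itertools.product(*options): leftmost factor varies slowest
def pvProduct : List (List (Int × Int)) → List (List (Int × Int))
  | [] => [[]]
  | o :: rest => o.flatMap (fun x => (pvProduct rest).map (fun t => x :: t))

def generate_orders (numbers : List Int) : List (List Int) :=
  let first := PySem.List.pyGetD numbers 0 0
  let last := PySem.List.pyGetD numbers (-1) 0
  let middle := PySem.List.slice numbers (some 1) (some (-1))
  let pairs := (PySem.List.pyRange 0 (middle.length : Int) 2).map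
      (fun i => (PySem.List.pyGetD middle i 0, PySem.List.pyGetD middle (i + 1) 0))
  let pair_permutations := pvPermsA pairs.length pairs
  pair_permutations.foldl (fun all_orders perm =>
    let internal_swaps := pvProduct (perm.map (fun p => [p, (p.2, p.1)]))
    internal_swaps.foldl (fun acc sw =>
      acc ++ [(first :: sw.flatMap (fun p => [p.1, p.2])) ++ [last]]) all_orders) []

-- ===== PORT B =====
def pvPermsB (fuel : Nat) (l : List (Int × Int)) : List (List (Int × Int)) :=
  match fuel with
  | 0 => [[]]
  | n + 1 =>
    if l.isEmpty then [[]]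
    else (PySem.List.pyRange 0 (l.length : Int) 1).flatMap (fun i =>
      (pvPermsB n (PySem.List.slice l none (some i) ++ PySem.List.slice l (some (i + 1)) none)).map
        (fun rest => PySem.List.pyGetD l i (0, 0) :: rest))

def pvOrients : List (Int × Int) → List (List Int)
  | [] => [[]]
  | (a, b) :: rest =>
    let tails := pvOrients rest
    (tails.map (fun t => a :: b :: t)) ++ (tails.map (fun t => b :: a :: t))

def generate_orders_alt (numbers : List Int) : List (List Int) :=
  let first := PySem.List.pyGetD numbers 0 0
  let last := PySem.List.pyGetD numbers (-1) 0
  let middle := PySem.List.slice numbers (some 1) (some (-1))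
  let pairs := (PySem.List.pyRange 0 (middle.length : Int) 2).map
      (fun i => (PySem.List.pyGetD middle i 0, PySem.List.pyGetD middle (i + 1) 0))
  (pvPermsB pairs.length pairs).flatMap (fun perm =>
    (pvOrients perm).map (fun flat => (first :: flat) ++ [last]))

-- ===== PRECONDITION & SPEC =====
-- Pre_ excludes exactly the inputs where Python A raises IndexError (empty list, or an
-- odd-length middle making middle[i + 1] overrun); B raises there too.
def Pre_generate_orders (numbers : List Int) : Prop :=
  numbers ≠ [] ∧ (numbers.length - 2) % 2 = 0

instance (numbers : List Int) : Decidable (Pre_generate_orders numbers) := by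
  unfold Pre_generate_orders; infer_instance

def pvWitness_generate_orders : List Int := [1, 2, 3, 4]

def Spec_generate_orders (numbers : List Int) (out : List (List Int)) : Prop := out = generate_orders_alt numbers
instance (numbers : List Int) (out : List (List Int)) : Decidable (Spec_generate_orders numbers out) := by unfold Spec_generate_orders; infer_instance

-- ===== CLAIM (what is proved, stated in full; the proofs are below) =====
def Claim_equal_generate_orders : Prop := ∀ (numbers : List Int), Dom_generate_orders numbers → Pre_generate_orders numbers → Spec_generate_orders numbers (generate_orders numbers)

-- ===== LEMMAS AND PROOFS =====

-- B's index-removal step equals A's selection helper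
theorem sel_eq (l : List (Int × Int)) :
    (List.range l.length).map
      (fun k => (l.getD k (0, 0), l.take k ++ l.drop (k + 1))) = pvSelect l := by
  induction l with
  | nil => simp [pvSelect]
  | cons x xs ih =>
    simp [pvSelect, List.range_succ_eq_map, ← ih, List.map_map, Function.comp]

theorem perms_eq (f : Nat) (l : List (Int × Int)) : pvPermsB f l = pvPermsA f l := by
  induction f generalizing l with
  | zero => rfl
  | succ n ih =>
    cases l with
    | nil => rfl
    | cons x xs =>
      simp only [pvPermsB, pvPermsA]
      rw [if_neg (by simp)]
      simp only [ih]
      rw [← sel_eq (x :: xs), List.flatMap_map, PySem.List.pyRange_one]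
      rw [List.flatMap_map]
      congr 1
      funext k
      have h1 : (0 : Int) + (k : Nat) = ((k : Nat) : Int) := by ring
      rw [h1]
      have h3 : PySem.List.slice (x :: xs) (some ((k : Int) + 1)) none = List.drop k xs := by
        have hk : ((k : Int) + 1) = ((k + 1 : Nat) : Int) := by push_cast; ring
        rw [hk, PySem.List.slice_from_natCast]
        rfl
      rw [h3]
      simp [PySem.List.slice_to_natCast]

theorem orients_eq (perm : List (Int × Int)) :
    (pvProduct (perm.map (fun p => [p, (p.2, p.1)]))).map
      (fun sw => sw.flatMap (fun p => [p.1, p.2])) = pvOrients perm := by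
  induction perm with
  | nil => rfl
  | cons p rest ih =>
    simp [pvProduct, pvOrients, ← ih, List.map_map, Function.comp_def]

theorem main_eq (first last : Int) (ps : List (Int × Int)) (f : Nat) :
    (pvPermsA f ps).foldl (fun all_orders perm =>
      (pvProduct (perm.map (fun p => [p, (p.2, p.1)]))).foldl (fun acc sw =>
        acc ++ [(first :: sw.flatMap (fun p => [p.1, p.2])) ++ [last]]) all_orders) []
    = (pvPermsB f ps).flatMap (fun perm =>
      (pvOrients perm).map (fun flat => (first :: flat) ++ [last])) := by
  simp only [PySem.List.foldl_append_singleton_eq_map]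
  rw [PySem.List.foldl_append_eq_flatMap, perms_eq]
  simp only [← orients_eq, List.map_map, Function.comp_def, List.nil_append]

-- ===== VERDICT (by name: the statement is the Claim_ definition above) =====
theorem generate_orders_spec : Claim_equal_generate_orders := by
  intro numbers _ _
  unfold Spec_generate_orders generate_orders generate_orders_alt
  exact main_eq _ _ _ _
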